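-- pv_equiv track=rewrite | github.com/dctucker/roland-capture | utils/lib/types.py | to_nibbles
-- ===== SOURCE A (Python) =====
-- def to_nibbles(val, n):
-- 	""" convert 0x0123 to [ 0x00, 0x01, 0x02, 0x03 ] """
-- 	buf = []
-- 	acc = val
-- 	while acc > 0 and len(buf) < n:
-- 		buf.insert(0, acc & 0x0f)
-- 		acc = acc >> 4
-- 	while len(buf) < n:
-- 		buf.insert(0,0)
-- 	return buf
-- ===== SOURCE B (Python) =====
-- def to_nibbles(val, n):
-- 	""" convert 0x0123 to [ 0x00, 0x01, 0x02, 0x03 ] """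
-- 	v = val if val > 0 else 0
-- 	return [(v >> (4 * (n - 1 - i))) & 0x0f for i in range(n)]
-- ===== Notes on version B (the rewrite author's own statement) =====
-- stated objective: faster
-- what changed: B replaces A's two while-loops (accumulator shifted nibble by nibble with O(len) insert(0, ...) prepends, then a zero-padding loop) by a single comprehension that extracts each nibble independently from its fixed 4-bit offset, clamping non-positive val to 0.
import Mathlib
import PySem

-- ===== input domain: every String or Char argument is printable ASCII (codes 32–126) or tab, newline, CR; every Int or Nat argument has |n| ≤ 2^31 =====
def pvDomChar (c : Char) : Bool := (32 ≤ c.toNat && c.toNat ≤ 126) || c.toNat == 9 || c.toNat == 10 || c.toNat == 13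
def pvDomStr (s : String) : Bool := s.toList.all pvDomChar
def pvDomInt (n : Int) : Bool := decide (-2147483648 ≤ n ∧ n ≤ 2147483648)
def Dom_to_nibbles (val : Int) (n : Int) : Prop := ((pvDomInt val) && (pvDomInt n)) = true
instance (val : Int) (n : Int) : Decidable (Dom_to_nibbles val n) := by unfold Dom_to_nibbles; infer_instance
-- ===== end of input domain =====

-- B extracts each nibble independently by its bit offset (one comprehension) instead of A's
-- two accumulator loops with insert(0, …) prepends; objective: faster (no per-step prepend), same exact values.

-- ===== PORT A =====
-- termination measure for the first while loop: acc shrinks under `>> 4`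
theorem pvShiftLt (a : Int) (h : 0 < a) : (a >>> (4:Nat)).toNat < a.toNat := by
  rcases a with m | m
  · show ((((m : Nat) >>> 4 : Nat)) : Int).toNat < (Int.ofNat m).toNat
    simp [Nat.shiftRight_eq_div_pow] at *
    omega
  · omega

-- `while acc > 0 and len(buf) < n: buf.insert(0, acc & 0x0f); acc = acc >> 4`
def to_nibbles_loop (acc : Int) (buf : List Int) (n : Int) : List Int :=
  if _h : 0 < acc ∧ (buf.length : Int) < n then
    to_nibbles_loop (acc >>> (4:Nat)) (PySem.Int.band acc 15 :: buf) n
  else buf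
termination_by acc.toNat
decreasing_by exact pvShiftLt acc _h.1

-- `while len(buf) < n: buf.insert(0, 0)`
def to_nibbles_pad (buf : List Int) (n : Int) : List Int :=
  if _h : (buf.length : Int) < n then to_nibbles_pad (0 :: buf) n else buf
termination_by (n - buf.length).toNat
decreasing_by simp; omega

def to_nibbles (val : Int) (n : Int) : List Int :=
  to_nibbles_pad (to_nibbles_loop val [] n) n

-- ===== PORT B =====
def to_nibbles_alt (val : Int) (n : Int) : List Int :=
  let v : Int := if 0 < val then val else 0
  (PySem.List.pyRange 0 n 1).map (fun i => PySem.Int.band (v >>> (4 * (n - 1 - i)).toNat) 15)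

-- ===== PRECONDITION & SPEC =====
def Spec_to_nibbles (val : Int) (n : Int) (out : List Int) : Prop := out = to_nibbles_alt val n
instance (val : Int) (n : Int) (out : List Int) : Decidable (Spec_to_nibbles val n out) := by unfold Spec_to_nibbles; infer_instance

-- ===== CLAIM (what is proved, stated in full; the proofs are below) =====
def Claim_equal_to_nibbles : Prop := ∀ (val : Int) (n : Int), Dom_to_nibbles val n → Spec_to_nibbles val n (to_nibbles val n)

-- ===== LEMMAS AND PROOFS =====

theorem pvShiftNonneg (a : Int) (h : 0 ≤ a) : 0 ≤ a >>> (4:Nat) := by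
  rcases a with m | m
  · exact Int.natCast_nonneg _
  · omega

-- buf only rides along: the loop computes its new elements independently of buf
theorem loop_split (k : Nat) : ∀ (acc : Int), acc.toNat = k → ∀ (buf : List Int) (n : Int),
    to_nibbles_loop acc buf n = to_nibbles_loop acc [] (n - buf.length) ++ buf := by
  induction k using Nat.strong_induction_on with
  | _ k ih =>
    intro acc hk buf n
    conv_lhs => rw [to_nibbles_loop]
    conv_rhs => rw [to_nibbles_loop]
    by_cases hpos : 0 < acc
    · by_cases hlen : (buf.length : Int) < n
      · rw [dif_pos ⟨hpos, hlen⟩, dif_pos ⟨hpos, by simp; omega⟩]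
        rw [ih _ (hk ▸ pvShiftLt acc hpos) _ rfl,
            ih _ (hk ▸ pvShiftLt acc hpos) _ rfl (buf := [PySem.Int.band acc 15])]
        simp only [List.length_cons, List.length_nil, List.append_assoc, List.singleton_append]
        congr 2
        omega
      · rw [dif_neg (by tauto), dif_neg (by simp; omega)]
        simp
    · rw [dif_neg (by tauto), dif_neg (by tauto)]
      simp

theorem pad_eq (j : Nat) : ∀ (buf : List Int) (n : Int), (n - buf.length).toNat = j →
    to_nibbles_pad buf n = List.replicate (n - buf.length).toNat 0 ++ buf := by
  induction j with
  | zero =>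
    intro buf n hj
    rw [to_nibbles_pad, dif_neg (by omega)]
    simp [hj]
  | succ j ih =>
    intro buf n hj
    rw [to_nibbles_pad, dif_pos (by omega)]
    rw [ih (0 :: buf) n (by simp; omega)]
    have h1 : (n - ((0 : Int) :: buf).length).toNat = j := by simp; omega
    rw [h1]
    have h2 : (n - (buf.length : Int)).toNat = j + 1 := hj
    rw [h2, List.replicate_succ']
    simp

-- the recurrence B satisfies for positive val
theorem alt_step (val n : Int) (hv : 0 < val) (hn : 1 ≤ n) :
    to_nibbles_alt val n = to_nibbles_alt (val >>> (4:Nat)) (n - 1) ++ [PySem.Int.band val 15] := by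
  have hvs : (if (0:Int) < val then val else 0) = val := if_pos hv
  unfold to_nibbles_alt
  simp only [hvs]
  have hr : PySem.List.pyRange 0 n 1 = PySem.List.pyRange 0 (n - 1) 1 ++ [n - 1] := by
    have h := PySem.List.pyRange_one_succ_right (a := 0) (b := n - 1) (by omega)
    rw [show n - 1 + 1 = n by ring] at h
    exact h
  rw [hr, List.map_append]
  congr 1
  · apply List.map_congr_left
    intro i hi
    rw [PySem.List.mem_pyRange_one] at hi
    by_cases hsv : (0:Int) < val >>> (4:Nat)
    · rw [if_pos hsv, show (4 * (n - 1 - i)).toNat = 4 + (4 * (n - 1 - 1 - i)).toNat by omega,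
          Int.shiftRight_add]
    · have hz : val >>> (4:Nat) = 0 := le_antisymm (by omega) (pvShiftNonneg val (by omega))
      rw [if_neg hsv]
      have hzz : val >>> (4 * (n - 1 - i)).toNat = 0 := by
        have h4 : (4 * (n - 1 - i)).toNat = 4 + (4 * (n - 1 - 1 - i)).toNat := by omega
        rw [h4, Int.shiftRight_add]
        simp only [hz]
        simp
      rw [hzz, show ((0:Int) >>> (4 * (n - 1 - 1 - i)).toNat) = 0 by simp]
  · simp

-- B yields all zeros when val ≤ 0 (the clamp) — matching A's empty loop + zero padding
theorem alt_nonpos (val n : Int) (hv : ¬ 0 < val) :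
    to_nibbles_alt val n = List.replicate n.toNat (0:Int) := by
  unfold to_nibbles_alt
  rw [if_neg hv]
  have : ∀ i : Int, PySem.Int.band ((0:Int) >>> (4 * (n - 1 - i)).toNat) 15 = 0 := by
    intro i
    rw [show ((0:Int) >>> (4 * (n - 1 - i)).toNat) = 0 by simp]
    decide
  rw [List.map_congr_left (fun i _ => this i), List.map_const']
  simp [PySem.List.length_pyRange_one]

theorem main_eq (m : Nat) : ∀ (val n : Int), n.toNat = m →
    to_nibbles val n = to_nibbles_alt val n := by
  induction m with
  | zero =>
    intro val n hm
    have hn : n ≤ 0 := by omega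
    unfold to_nibbles
    rw [to_nibbles_loop, dif_neg (by simp; omega)]
    rw [to_nibbles_pad, dif_neg (by simp; omega)]
    unfold to_nibbles_alt
    rw [show PySem.List.pyRange 0 n 1 = [] from by
      simp [PySem.List.pyRange]; omega]
    simp
  | succ m ih =>
    intro val n hm
    have hn : 1 ≤ n := by omega
    by_cases hv : 0 < val
    · unfold to_nibbles
      rw [to_nibbles_loop, dif_pos ⟨hv, by simpa using hn⟩]
      rw [loop_split _ _ rfl]
      have hlen1 : ((([PySem.Int.band val 15] : List Int)).length : Int) = 1 := by simp
      rw [show n - (([PySem.Int.band val 15] : List Int).length : Int) = n - 1 by rw [hlen1]]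
      rw [pad_eq _ _ _ rfl]
      have hA : to_nibbles (val >>> (4:Nat)) (n - 1)
          = List.replicate ((n - 1) - (to_nibbles_loop (val >>> (4:Nat)) [] (n-1)).length).toNat (0:Int)
            ++ to_nibbles_loop (val >>> (4:Nat)) [] (n - 1) := by
        unfold to_nibbles
        exact pad_eq _ _ _ rfl
      rw [alt_step val n hv hn, ← ih (val >>> (4:Nat)) (n - 1) (by omega), hA]
      have : (n - ((to_nibbles_loop (val >>> (4:Nat)) [] (n - 1) ++ [PySem.Int.band val 15]).length : Int)).toNat
           = ((n - 1) - ((to_nibbles_loop (val >>> (4:Nat)) [] (n - 1)).length : Int)).toNat := by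
        simp; omega
      rw [this]
      simp
    · unfold to_nibbles
      rw [to_nibbles_loop, dif_neg (by tauto)]
      rw [pad_eq _ _ _ rfl]
      rw [alt_nonpos val n hv]
      simp

-- ===== VERDICT (by name: the statement is the Claim_ definition above) =====
theorem to_nibbles_spec : Claim_equal_to_nibbles := by
  intro val n _
  exact main_eq n.toNat val n rfl
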